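-- pv_equiv track=rewrite | github.com/lyra11liu-png/blast_seq_filter | codes/dbbuild/dedup_build.py | sanitize_and_flag
-- ===== SOURCE A (Python) =====
-- _ALLOWED = set("ACGTN")
--
-- def sanitize_and_flag(seq: str):
--     """
--     返回: (clean_seq, bad_pos, bad_chars)
--       - clean_seq: 清洗后的序列（U->T，其它->N）
--       - bad_pos:   原序列里非法字符的位置(0-based)
--       - bad_chars: 这些非法字符的去重集合（列表）
--     """
--     raw = seq.upper().replace("U", "T")
--     bad_pos = [i for i, ch in enumerate(raw) if ch not in _ALLOWED]
--     if bad_pos: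
--         clean = "".join((ch if ch in _ALLOWED else "N") for ch in raw)
--         bad_chars = sorted(set(raw[i] for i in bad_pos))
--     else:
--         clean = raw
--         bad_chars = []
--     return clean, bad_pos, bad_chars
-- ===== SOURCE B (Python) =====
-- _ALLOWED = set("ACGTN")
--
-- def sanitize_and_flag(seq: str):
--     # One fused pass over enumerate(raw): clean chars, bad positions and the
--     # deduplicated bad-character set are accumulated together.
--     raw = seq.upper().replace("U", "T")
--     clean_chars = []
--     bad_pos = []
--     bad_set = set()
--     for i, ch in enumerate(raw):
--         if ch in _ALLOWED:
--             clean_chars.append(ch)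
--         else:
--             clean_chars.append("N")
--             bad_pos.append(i)
--             bad_set.add(ch)
--     return "".join(clean_chars), bad_pos, sorted(bad_set)
-- ===== Notes on version B (the rewrite author's own statement) =====
-- stated objective: alternative
-- what changed: A's three separate comprehension passes over raw (find bad positions, rebuild the cleaned string, re-index raw to collect bad characters) are fused into one accumulator-driven loop over enumerate(raw) that builds the clean characters, bad positions and deduplicated bad-character set together, with no re-indexing pass.
import Mathlib
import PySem

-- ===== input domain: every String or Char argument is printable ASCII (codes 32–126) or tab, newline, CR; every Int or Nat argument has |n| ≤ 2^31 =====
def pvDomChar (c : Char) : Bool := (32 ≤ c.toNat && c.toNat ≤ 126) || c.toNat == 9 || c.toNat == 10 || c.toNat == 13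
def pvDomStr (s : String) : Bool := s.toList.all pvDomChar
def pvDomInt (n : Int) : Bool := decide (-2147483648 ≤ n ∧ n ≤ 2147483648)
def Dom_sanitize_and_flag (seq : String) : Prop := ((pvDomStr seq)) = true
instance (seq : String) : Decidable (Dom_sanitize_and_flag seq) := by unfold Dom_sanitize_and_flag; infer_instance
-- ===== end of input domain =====

-- B fuses A's three separate passes over raw into one accumulator-driven loop; objective: alternative decomposition, same cost.

-- module constant _ALLOWED = set("ACGTN"), shared by both Pythons
def pvAllowed : PySem.Set Char := PySem.Set.ofList "ACGTN".toList

-- ===== PORT A =====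
def sanitize_and_flag (seq : String) : String × List Int × List String :=
  let raw : List Char := PySem.Chars.replace (PySem.Chars.upper seq.toList) ['U'] ['T']
  let bad_pos : List Int :=
    ((PySem.List.enumerate raw 0).filter
      (fun p => !(PySem.Set.contains pvAllowed p.2))).map (fun p => p.1)
  if bad_pos ≠ [] then
    let clean : String :=
      String.ofList (raw.map (fun ch => if PySem.Set.contains pvAllowed ch then ch else 'N'))
    let bad_chars : List String :=
      (PySem.List.sorted
        (PySem.Set.ofList (bad_pos.map (fun i => PySem.List.pyGetD raw i ' ')))
        (fun c => c) false).map (fun c => String.ofList [c])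
    (clean, bad_pos, bad_chars)
  else
    (String.ofList raw, bad_pos, [])

-- ===== PORT B =====
def sanitize_and_flag_alt (seq : String) : String × List Int × List String :=
  let raw : List Char := PySem.Chars.replace (PySem.Chars.upper seq.toList) ['U'] ['T']
  let st : List Char × List Int × PySem.Set Char :=
    (PySem.List.enumerate raw 0).foldl
      (fun st p =>
        if PySem.Set.contains pvAllowed p.2 then
          (st.1 ++ [p.2], st.2.1, st.2.2)
        else
          (st.1 ++ ['N'], st.2.1 ++ [p.1], PySem.Set.add st.2.2 p.2))
      ([], [], PySem.Set.empty)
  (String.ofList st.1, st.2.1,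
    (PySem.List.sorted st.2.2 (fun c => c) false).map (fun c => String.ofList [c]))

-- ===== PRECONDITION & SPEC =====
def Spec_sanitize_and_flag (seq : String) (out : String × List Int × List String) : Prop := out = sanitize_and_flag_alt seq
instance (seq : String) (out : String × List Int × List String) : Decidable (Spec_sanitize_and_flag seq out) := by unfold Spec_sanitize_and_flag; infer_instance

-- ===== CLAIM (what is proved, stated in full; the proofs are below) =====
def Claim_equal_sanitize_and_flag : Prop := ∀ (seq : String), Dom_sanitize_and_flag seq → Spec_sanitize_and_flag seq (sanitize_and_flag seq)

-- ===== LEMMAS AND PROOFS =====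

-- B's fold over enumerate, characterised: clean = map, positions = filtered indices, set = fold of add over the bad chars
theorem pv_fold_char (l : List Char) (s : Int) (c0 : List Char) (p0 : List Int)
    (s0 : PySem.Set Char) :
    (PySem.List.enumerate l s).foldl
      (fun st p =>
        if PySem.Set.contains pvAllowed p.2 then
          (st.1 ++ [p.2], st.2.1, st.2.2)
        else
          (st.1 ++ ['N'], st.2.1 ++ [p.1], PySem.Set.add st.2.2 p.2))
      (c0, p0, s0) =
    (c0 ++ l.map (fun ch => if PySem.Set.contains pvAllowed ch then ch else 'N'),
     p0 ++ ((PySem.List.enumerate l s).filter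
              (fun p => !(PySem.Set.contains pvAllowed p.2))).map (fun p => p.1),
     (l.filter (fun ch => !(PySem.Set.contains pvAllowed ch))).foldl PySem.Set.add s0) := by
  induction l generalizing s c0 p0 s0 with
  | nil => simp [PySem.List.enumerate_nil]
  | cons a t ih =>
    rw [PySem.List.enumerate_cons, List.foldl_cons]
    by_cases h : a ∈ pvAllowed
    · rw [if_pos (by simp [h]), ih]
      simp [h]
    · rw [if_neg (by simp [h]), ih]
      simp [h]

-- map snd of the filtered enumerate equals filter of the list itself, for any start index
theorem pv_map_snd_filter (l : List Char) (s : Int) :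
    ((PySem.List.enumerate l s).filter
       (fun p => !(PySem.Set.contains pvAllowed p.2))).map (fun p : Int × Char => p.2) =
    l.filter (fun ch => !(PySem.Set.contains pvAllowed ch)) := by
  induction l generalizing s with
  | nil => simp [PySem.List.enumerate_nil]
  | cons a t ih =>
    rw [PySem.List.enumerate_cons]
    by_cases h : a ∈ pvAllowed
    · simpa [h] using ih (s + 1)
    · simpa [h] using ih (s + 1)

-- chars at the flagged positions, read back through pyGetD, are the bad chars of l in order
theorem pv_bad_chars (l : List Char) :
    (((PySem.List.enumerate l 0).filter
        (fun p => !(PySem.Set.contains pvAllowed p.2))).map (fun p => p.1)).map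
      (fun i => PySem.List.pyGetD l i ' ') =
    l.filter (fun ch => !(PySem.Set.contains pvAllowed ch)) := by
  rw [List.map_map]
  have hmem : ∀ p ∈ (PySem.List.enumerate l 0).filter
      (fun p => !(PySem.Set.contains pvAllowed p.2)),
      ((fun i => PySem.List.pyGetD l i ' ') ∘ (fun p : Int × Char => p.1)) p =
        (fun p : Int × Char => p.2) p := by
    intro p hp
    have hpe := List.mem_of_mem_filter hp
    rcases (PySem.List.mem_enumerate_iff _ _ _).1 hpe with ⟨k, hk, rfl⟩
    simp [PySem.List.pyGetD_natCast, hk]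
  rw [List.map_congr_left hmem]
  exact pv_map_snd_filter l 0

-- ===== VERDICT (by name: the statement is the Claim_ definition above) =====
theorem sanitize_and_flag_spec : Claim_equal_sanitize_and_flag := by
  intro seq _
  unfold Spec_sanitize_and_flag sanitize_and_flag sanitize_and_flag_alt
  simp only [pv_fold_char, List.nil_append]
  set raw := PySem.Chars.replace (PySem.Chars.upper seq.toList) ['U'] ['T'] with hraw
  by_cases hb : ((PySem.List.enumerate raw 0).filter
      (fun p => !(PySem.Set.contains pvAllowed p.2))).map (fun p => p.1) = []
  · -- no bad characters: every char of raw is allowed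
    have hfil : raw.filter (fun ch => !(PySem.Set.contains pvAllowed ch)) = [] := by
      rw [← pv_map_snd_filter raw 0, List.map_eq_nil_iff.1 hb]
      simp
    have hmap : raw.map (fun ch => if PySem.Set.contains pvAllowed ch then ch else 'N')
        = raw := by
      have hall := List.filter_eq_nil_iff.1 hfil
      have := List.map_congr_left (l := raw)
        (f := fun ch => if PySem.Set.contains pvAllowed ch then ch else 'N') (g := id)
        (by intro ch hch
            have := hall ch hch
            simp at this
            simp [this])
      simpa using this
    rw [if_neg (fun hcon => hcon hb), hb, hfil, hmap]
    rfl
  · rw [if_pos hb]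
    simp only [Prod.mk.injEq]
    refine ⟨trivial, trivial, ?_⟩
    rw [pv_bad_chars raw]
    rfl
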